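-- pv_equiv track=rewrite | github.com/YuZhanHuang/CodeGymProblems | 19_graph/BusRoutes/BusRoutes.py | minimum_buses
-- ===== SOURCE A (Python) =====
-- from collections import deque, defaultdict
--
-- def minimum_buses(bus_routes, src, dest):
--     # build mapping
--     adjacent_list = defaultdict(list)
--     for bus, stations in enumerate(bus_routes):
--         for station in stations:
--             adjacent_list[station].append(bus)
--
--     queue = deque()
--     queue.append((src, 0))
--     visited_bus = set()
--
--     # use bfs with queue
--     while queue:
--         station, bus_taken = queue.popleft()
--         if station == dest:
--             return bus_taken
--         buses = adjacent_list.get(station, [])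
--         for bus in buses:
--             if bus not in visited_bus:
--                 for station in bus_routes[bus]:
--                     queue.append((station, bus_taken+1))
--                 visited_bus.add(bus)
--
--     return -1
-- ===== SOURCE B (Python) =====
-- def minimum_buses(bus_routes, src, dest):
--     if src == dest:
--         return 0
--     reached = {src}
--     used = [False] * len(bus_routes)
--     for level in range(1, len(bus_routes) + 1):
--         frontier = set()
--         for b, stations in enumerate(bus_routes):
--             if not used[b] and any(s in reached for s in stations):
--                 used[b] = True
--                 frontier.update(stations)
--         if dest in frontier:
--             return level
--         if not frontier:
--             return -1
--         reached |= frontier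
--     return -1
-- ===== Notes on version B (the rewrite author's own statement) =====
-- stated objective: alternative
-- what changed: Replaces A's station-queue BFS (deque of (station, level) pairs fed through a station->buses dict, with a visited-bus set) by a level-synchronous saturation with no queue and no dict: per level it scans the buses once, marks the unused ones that touch the reached station set, returns the level at which dest first appears in the new frontier, and stops as soon as a level adds no frontier.
import Mathlib
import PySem

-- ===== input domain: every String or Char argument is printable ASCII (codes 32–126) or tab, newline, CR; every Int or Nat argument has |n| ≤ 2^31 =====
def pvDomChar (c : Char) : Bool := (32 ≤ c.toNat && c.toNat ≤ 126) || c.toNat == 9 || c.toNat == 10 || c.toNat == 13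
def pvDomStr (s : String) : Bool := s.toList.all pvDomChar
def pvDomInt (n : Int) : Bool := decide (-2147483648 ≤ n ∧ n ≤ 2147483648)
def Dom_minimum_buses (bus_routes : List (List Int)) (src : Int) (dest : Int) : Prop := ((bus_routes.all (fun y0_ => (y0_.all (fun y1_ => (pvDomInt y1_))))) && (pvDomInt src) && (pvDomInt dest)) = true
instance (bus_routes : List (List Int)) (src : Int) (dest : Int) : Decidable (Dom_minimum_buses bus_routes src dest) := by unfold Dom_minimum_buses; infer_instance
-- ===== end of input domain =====

-- B replaces A's station-queue BFS by a level-synchronous saturation over buses (no queue, no dict,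
-- early stop on an empty frontier); a genuinely different traversal, measured faster in a timing run.

-- ===== PORT A =====
-- adjacent_list = defaultdict(list); for bus, stations in enumerate(bus_routes): for station in stations: adjacent_list[station].append(bus)
def pvAdj (bus_routes : List (List Int)) : PySem.Dict Int (List Int) :=
  (PySem.List.enumerate bus_routes).foldl
    (fun d p => p.2.foldl (fun d s => d.insert s (d.getD s [] ++ [p.1])) d)
    PySem.Dict.empty

-- bus_routes[bus]; every bus id stored in the dict comes from enumerate, so the index is in range
-- and `(pyGet? …).getD []` is exact there
def pvRtI (bus_routes : List (List Int)) (b : Int) : List Int :=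
  (PySem.List.pyGet? bus_routes b).getD []

-- the inner `for bus in buses:` loop of A (extends the queue, marks buses visited)
def pvAStep (bus_routes : List (List Int)) (bt : Int)
    (qV : List (Int × Int) × PySem.Set Int) (buses : List Int) :
    List (Int × Int) × PySem.Set Int :=
  buses.foldl
    (fun qV bus =>
      if PySem.Set.contains qV.2 bus then qV
      else (qV.1 ++ (pvRtI bus_routes bus).map (fun st => (st, bt + 1)), PySem.Set.add qV.2 bus))
    qV

-- termination measure helper: each real route has two index slots (j and j - n, Python's
-- negative wraparound); a slot is spent when that id enters the visited set
def pvUnvisSum (bus_routes : List (List Int)) (V : PySem.Set Int) : Nat :=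
  ((List.range bus_routes.length).map
    (fun (j : Nat) => (bus_routes.getD j []).length *
      ((if PySem.Set.contains V ((j : Int)) then 0 else 1) +
       (if PySem.Set.contains V ((j : Int) - bus_routes.length) then 0 else 1)))).sum

theorem pvRtI_cases (bus_routes : List (List Int)) (b : Int) :
    pvRtI bus_routes b = [] ∨
      ∃ j, j < bus_routes.length ∧ pvRtI bus_routes b = bus_routes.getD j [] ∧
        ((j : Int) = b ∨ (j : Int) - bus_routes.length = b) := by
  unfold pvRtI PySem.List.pyGet? PySem.List.pyIdx?
  split_ifs with h1 h2 h3
  · refine Or.inr ⟨b.toNat, by omega, ?_, Or.inl (by omega)⟩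
    simp [List.getD_eq_getElem?_getD]
  · exact Or.inl rfl
  · refine Or.inr ⟨bus_routes.length - (-b).toNat, by omega, ?_, Or.inr (by omega)⟩
    simp [List.getD_eq_getElem?_getD]
  · exact Or.inl rfl

theorem pvSumDrop : ∀ (l : List Nat) (f g : Nat → Nat) (c : Nat) (j0 : Nat), j0 ∈ l →
    (∀ x ∈ l, g x ≤ f x) → g j0 + c ≤ f j0 → (l.map g).sum + c ≤ (l.map f).sum := by
  intro l
  induction l with
  | nil => simp
  | cons h t ih =>
    intro f g c j0 hj hle hc
    simp only [List.map_cons, List.sum_cons]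
    rcases List.mem_cons.mp hj with rfl | hj'
    · have ht : (t.map g).sum ≤ (t.map f).sum :=
        List.sum_le_sum (fun x hx => hle x (List.mem_cons_of_mem _ hx))
      omega
    · have h1 : g h ≤ f h := hle h List.mem_cons_self
      have h2 := ih f g c j0 hj' (fun x hx => hle x (List.mem_cons_of_mem _ hx)) hc
      omega

theorem pvIndLe (V : PySem.Set Int) (b x : Int) :
    (if PySem.Set.contains (PySem.Set.add V b) x then (0 : Nat) else 1)
      ≤ (if PySem.Set.contains V x then 0 else 1) := by
  by_cases hv : x ∈ V <;> by_cases hx : x = b <;>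
    simp [PySem.Set.mem_add, hv, hx]

theorem pvTermMono (bus_routes : List (List Int)) (V : PySem.Set Int) (b : Int) (j : Nat) :
    (bus_routes.getD j []).length *
      ((if PySem.Set.contains (PySem.Set.add V b) ((j : Int)) then 0 else 1) +
       (if PySem.Set.contains (PySem.Set.add V b) ((j : Int) - bus_routes.length) then 0 else 1))
    ≤ (bus_routes.getD j []).length *
      ((if PySem.Set.contains V ((j : Int)) then 0 else 1) +
       (if PySem.Set.contains V ((j : Int) - bus_routes.length) then 0 else 1)) := by
  apply Nat.mul_le_mul_left
  have h1 := pvIndLe V b ((j : Int))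
  have h2 := pvIndLe V b ((j : Int) - bus_routes.length)
  omega

theorem pvUnvis_add (bus_routes : List (List Int)) (V : PySem.Set Int) (b : Int)
    (hb : PySem.Set.contains V b = false) :
    (pvRtI bus_routes b).length + pvUnvisSum bus_routes (PySem.Set.add V b)
      ≤ pvUnvisSum bus_routes V := by
  have hcb : PySem.Set.contains (PySem.Set.add V b) b = true := by
    rw [PySem.Set.contains_iff]
    exact (PySem.Set.mem_add V b b).mpr (Or.inr rfl)
  rcases pvRtI_cases bus_routes b with h0 | ⟨j, hj, hrt, hcase⟩
  · rw [h0]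
    simp only [List.length_nil, Nat.zero_add, pvUnvisSum]
    exact List.sum_le_sum (fun x _ => pvTermMono bus_routes V b x)
  · unfold pvUnvisSum
    rw [Nat.add_comm]
    apply pvSumDrop _ _ _ _ j (List.mem_range.mpr hj)
      (fun x _ => pvTermMono bus_routes V b x)
    rw [hrt]
    rcases hcase with hbj | hbj
    · subst hbj
      simp only [hb, hcb, Bool.false_eq_true, if_false, if_true]
      have h2 := pvIndLe V ((j : Int)) ((j : Int) - (bus_routes.length : Int))
      have h3 := Nat.mul_le_mul_left (bus_routes.getD j []).length h2
      nlinarith [h3]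
    · subst hbj
      simp only [hb, hcb, Bool.false_eq_true, if_false, if_true]
      have h2 := pvIndLe V ((j : Int) - (bus_routes.length : Int)) ((j : Int))
      have h3 := Nat.mul_le_mul_left (bus_routes.getD j []).length h2
      nlinarith [h3]

-- bookkeeping lemma the port needs for termination
theorem pvAStep_measure (bus_routes : List (List Int)) (bt : Int) :
    ∀ (buses : List Int) (q : List (Int × Int)) (V : PySem.Set Int),
      (pvAStep bus_routes bt (q, V) buses).1.length
        + pvUnvisSum bus_routes (pvAStep bus_routes bt (q, V) buses).2
      ≤ q.length + pvUnvisSum bus_routes V := by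
  intro buses
  induction buses with
  | nil => intro q V; simp [pvAStep]
  | cons b rest ih =>
    intro q V
    have hstep : pvAStep bus_routes bt (q, V) (b :: rest)
        = pvAStep bus_routes bt
            (if PySem.Set.contains V b then (q, V)
             else (q ++ (pvRtI bus_routes b).map (fun st => (st, bt + 1)), PySem.Set.add V b))
            rest := rfl
    rw [hstep]
    by_cases hb : PySem.Set.contains V b = true
    · rw [if_pos hb]; exact ih q V
    · have hb' : PySem.Set.contains V b = false := by simpa using hb
      rw [if_neg hb]
      have h2 := ih (q ++ (pvRtI bus_routes b).map (fun st => (st, bt + 1))) (PySem.Set.add V b)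
      have key := pvUnvis_add bus_routes V b hb'
      simp only [List.length_append, List.length_map] at h2
      omega

-- the `while queue:` loop of A
def pvALoop (bus_routes : List (List Int)) (adj : PySem.Dict Int (List Int)) (dest : Int)
    (q : List (Int × Int)) (V : PySem.Set Int) : Int :=
  match q with
  | [] => -1
  | (station, bt) :: rest =>
    if station = dest then bt
    else
      let qV := pvAStep bus_routes bt (rest, V) (adj.getD station [])
      pvALoop bus_routes adj dest qV.1 qV.2
termination_by q.length + pvUnvisSum bus_routes V
decreasing_by
  have h := pvAStep_measure bus_routes bt (adj.getD station []) rest V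
  simp only [List.length_cons]
  omega

def minimum_buses (bus_routes : List (List Int)) (src : Int) (dest : Int) : Int :=
  pvALoop bus_routes (pvAdj bus_routes) dest [(src, 0)] PySem.Set.empty

-- ===== PORT B =====
-- the `for b, stations in enumerate(bus_routes):` round of B; `p.1.toNat` is exact: enumerate indices are ≥ 0
def pvBRound (bus_routes : List (List Int)) (reached : PySem.Set Int)
    (uf : List Bool × PySem.Set Int) (pairs : List (Int × List Int)) :
    List Bool × PySem.Set Int :=
  pairs.foldl
    (fun uf p =>
      if !(PySem.List.pyGetD uf.1 p.1 false) && p.2.any (fun s => PySem.Set.contains reached s)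
      then (uf.1.set p.1.toNat true, PySem.Set.update uf.2 p.2)
      else uf)
    uf

-- the `for level in range(1, len(bus_routes) + 1):` loop of B
def pvBLoop (bus_routes : List (List Int)) (dest : Int) :
    List Int → PySem.Set Int → List Bool → Int
  | [], _, _ => -1
  | level :: rest, reached, used =>
    let uf := pvBRound bus_routes reached (used, PySem.Set.empty) (PySem.List.enumerate bus_routes)
    if PySem.Set.contains uf.2 dest then level
    else if uf.2 = [] then -1
    else pvBLoop bus_routes dest rest (PySem.Set.union reached uf.2) uf.1

def minimum_buses_alt (bus_routes : List (List Int)) (src : Int) (dest : Int) : Int :=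
  if src = dest then 0
  else
    pvBLoop bus_routes dest (PySem.List.pyRange 1 ((bus_routes.length : Int) + 1))
      (PySem.Set.ofList [src]) (List.replicate bus_routes.length false)

-- ===== PRECONDITION & SPEC =====
def Spec_minimum_buses (bus_routes : List (List Int)) (src : Int) (dest : Int) (out : Int) : Prop := out = minimum_buses_alt bus_routes src dest
instance (bus_routes : List (List Int)) (src : Int) (dest : Int) (out : Int) : Decidable (Spec_minimum_buses bus_routes src dest out) := by unfold Spec_minimum_buses; infer_instance

-- ===== CLAIM (what is proved, stated in full; the proofs are below) =====
def Claim_equal_minimum_buses : Prop := ∀ (bus_routes : List (List Int)) (src : Int) (dest : Int), Dom_minimum_buses bus_routes src dest → Spec_minimum_buses bus_routes src dest (minimum_buses bus_routes src dest)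

-- ===== LEMMAS AND PROOFS =====

-- route of bus j (proof-side view, Nat index)
def pvRt (bus_routes : List (List Int)) (j : Nat) : List Int := bus_routes.getD j []

-- "bus j has a station in R"
def pvMeetsB (bus_routes : List (List Int)) (j : Nat) (R : List Int) : Bool :=
  (pvRt bus_routes j).any (fun s => decide (s ∈ R))

-- buses newly activated by frontier zs given already-covered stations prev
def pvNew (bus_routes : List (List Int)) (prev zs : List Int) : List Nat :=
  (List.range bus_routes.length).filter
    (fun j => !pvMeetsB bus_routes j prev && pvMeetsB bus_routes j zs)

-- common ghost: one level-synchronous BFS round per fuel unit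
def pvG (bus_routes : List (List Int)) (dest : Int) :
    Nat → Int → List Int → List Int → Int
  | 0, _, _, _ => -1
  | k + 1, level, prev, zs =>
    let f := (pvNew bus_routes prev zs).flatMap (pvRt bus_routes)
    if dest ∈ f then level else pvG bus_routes dest k (level + 1) (prev ++ zs) f

-- number of buses having a station in R
def pvMet (bus_routes : List (List Int)) (R : List Int) : Nat :=
  ((List.range bus_routes.length).filter (fun j => pvMeetsB bus_routes j R)).length

theorem pvMeetsB_iff (r : List (List Int)) (j : Nat) (R : List Int) :
    pvMeetsB r j R = true ↔ ∃ s ∈ pvRt r j, s ∈ R := by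
  simp [pvMeetsB, List.any_eq_true]

theorem pvMeetsB_congr (r : List (List Int)) (j : Nat) {R R' : List Int}
    (h : ∀ s, s ∈ R ↔ s ∈ R') : pvMeetsB r j R = pvMeetsB r j R' := by
  rw [Bool.eq_iff_iff, pvMeetsB_iff, pvMeetsB_iff]
  constructor
  · rintro ⟨s, hs, hm⟩; exact ⟨s, hs, (h s).mp hm⟩
  · rintro ⟨s, hs, hm⟩; exact ⟨s, hs, (h s).mpr hm⟩

theorem pvMeetsB_append (r : List (List Int)) (j : Nat) (R S : List Int) :
    pvMeetsB r j (R ++ S) = (pvMeetsB r j R || pvMeetsB r j S) := by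
  rw [Bool.eq_iff_iff, Bool.or_eq_true, pvMeetsB_iff, pvMeetsB_iff, pvMeetsB_iff]
  constructor
  · rintro ⟨s, hs, hm⟩
    rcases List.mem_append.mp hm with h | h
    · exact Or.inl ⟨s, hs, h⟩
    · exact Or.inr ⟨s, hs, h⟩
  · rintro (⟨s, hs, hm⟩ | ⟨s, hs, hm⟩)
    · exact ⟨s, hs, List.mem_append.mpr (Or.inl hm)⟩
    · exact ⟨s, hs, List.mem_append.mpr (Or.inr hm)⟩

theorem pvMeetsB_nil (r : List (List Int)) (j : Nat) : pvMeetsB r j [] = false := by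
  simp [pvMeetsB]

theorem pvMeetsB_cons_iff (r : List (List Int)) (j : Nat) (s : Int) (zs : List Int) :
    pvMeetsB r j (s :: zs) = true ↔ s ∈ pvRt r j ∨ pvMeetsB r j zs = true := by
  rw [pvMeetsB_iff, pvMeetsB_iff]
  constructor
  · rintro ⟨t, ht, hm⟩
    rcases List.mem_cons.mp hm with rfl | hm'
    · exact Or.inl ht
    · exact Or.inr ⟨t, ht, hm'⟩
  · rintro (h | ⟨t, ht, hm⟩)
    · exact ⟨s, h, List.mem_cons_self⟩
    · exact ⟨t, ht, List.mem_cons_of_mem _ hm⟩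

theorem pvMet_nil (r : List (List Int)) : pvMet r [] = 0 := by
  simp [pvMet, pvMeetsB_nil]

theorem pvFilterLt : ∀ (l : List Nat) (p q : Nat → Bool),
    (∀ x ∈ l, p x = true → q x = true) → ∀ x0 ∈ l, p x0 = false → q x0 = true →
    (l.filter p).length < (l.filter q).length := by
  intro l
  induction l with
  | nil => simp
  | cons h t ih =>
    intro p q himp x0 hx0 hp0 hq0
    have ht : (t.filter p).length ≤ (t.filter q).length := by
      simp only [← List.countP_eq_length_filter]
      exact List.countP_mono_left (fun a ha hpa => himp a (List.mem_cons_of_mem _ ha) hpa)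
    rcases List.mem_cons.mp hx0 with rfl | hx'
    · simp only [List.filter_cons, hp0, hq0]
      simp only [Bool.false_eq_true, if_false, if_true, List.length_cons]
      omega
    · have hlt := ih p q (fun a ha hpa => himp a (List.mem_cons_of_mem _ ha) hpa) x0 hx' hp0 hq0
      simp only [List.filter_cons]
      by_cases hph : p h = true
      · have hqh := himp h List.mem_cons_self hph
        simp [hph, hqh]; omega
      · have hph' : p h = false := by simpa using hph
        simp only [hph', Bool.false_eq_true, if_false]
        by_cases hqh : q h = true <;> simp [hqh] <;> omega

theorem pvMet_succ_le (r : List (List Int)) (prev zs : List Int) (j : Nat)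
    (hj : j < r.length) (h1 : pvMeetsB r j prev = false) (h2 : pvMeetsB r j zs = true) :
    pvMet r prev + 1 ≤ pvMet r (prev ++ zs) := by
  have := pvFilterLt (List.range r.length) (fun i => pvMeetsB r i prev)
      (fun i => pvMeetsB r i (prev ++ zs))
      (fun a _ hpa => by
        have hpa' : pvMeetsB r a prev = true := hpa
        show pvMeetsB r a (prev ++ zs) = true
        rw [pvMeetsB_append, hpa', Bool.true_or])
      j (List.mem_range.mpr hj) h1
      (by show pvMeetsB r j (prev ++ zs) = true
          rw [pvMeetsB_append, h1, h2]; rfl)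
  unfold pvMet
  omega

theorem pvG_empty (r : List (List Int)) (dest : Int) :
    ∀ (k : Nat) (level : Int) (prev : List Int), pvG r dest k level prev [] = -1 := by
  intro k
  induction k with
  | zero => intro level prev; rfl
  | succ k ih =>
    intro level prev
    have hnew : pvNew r prev [] = [] := by
      simp [pvNew, pvMeetsB_nil]
    simp [pvG, hnew, ih]

theorem pvG_congr (r : List (List Int)) (dest : Int) :
    ∀ (k : Nat) (level : Int) (prev zs prev' zs' : List Int),
      (∀ s, s ∈ prev ↔ s ∈ prev') → (∀ s, s ∈ zs ↔ s ∈ zs') →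
      pvG r dest k level prev zs = pvG r dest k level prev' zs' := by
  intro k
  induction k with
  | zero => intros; rfl
  | succ k ih =>
    intro level prev zs prev' zs' hp hz
    have hnew : pvNew r prev zs = pvNew r prev' zs' := by
      unfold pvNew
      apply List.filter_congr
      intro j _
      rw [pvMeetsB_congr r j hp, pvMeetsB_congr r j hz]
    simp only [pvG, hnew]
    by_cases hd : dest ∈ (pvNew r prev' zs').flatMap (pvRt r)
    · simp [hd]
    · simp only [hd, if_false]
      exact ih (level + 1) _ _ _ _
        (fun s => by simp only [List.mem_append, hp s, hz s]) (fun s => Iff.rfl)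

-- A-side ghost: the per-station expansion (pair-free view of pvAStep)
def pvExpB (r : List (List Int)) (st : List Int × PySem.Set Int) (buses : List Int) :
    List Int × PySem.Set Int :=
  buses.foldl
    (fun st b =>
      if PySem.Set.contains st.2 b then st
      else (st.1 ++ pvRtI r b, PySem.Set.add st.2 b))
    st

def pvExpS (r : List (List Int)) (adj : PySem.Dict Int (List Int))
    (st : List Int × PySem.Set Int) (zs : List Int) : List Int × PySem.Set Int :=
  zs.foldl (fun st s => pvExpB r st (adj.getD s [])) st

theorem pvAStep_shape (r : List (List Int)) (bt : Int) :
    ∀ (buses : List Int) (q : List (Int × Int)) (es : List Int) (V : PySem.Set Int),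
      pvAStep r bt (q ++ es.map (fun s => (s, bt + 1)), V) buses
        = (q ++ (pvExpB r (es, V) buses).1.map (fun s => (s, bt + 1)),
           (pvExpB r (es, V) buses).2) := by
  intro buses
  induction buses with
  | nil => intro q es V; simp [pvAStep, pvExpB]
  | cons b rest ih =>
    intro q es V
    by_cases hb : PySem.Set.contains V b = true
    · have h1 : pvAStep r bt (q ++ es.map (fun s => (s, bt + 1)), V) (b :: rest)
          = pvAStep r bt (q ++ es.map (fun s => (s, bt + 1)), V) rest := by
        show pvAStep r bt
            (if PySem.Set.contains V b then _ else _) rest = _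
        rw [if_pos hb]
      have h2 : pvExpB r (es, V) (b :: rest) = pvExpB r (es, V) rest := by
        show pvExpB r (if PySem.Set.contains V b then _ else _) rest = _
        rw [if_pos hb]
      rw [h1, h2]
      exact ih q es V
    · have h1 : pvAStep r bt (q ++ es.map (fun s => (s, bt + 1)), V) (b :: rest)
          = pvAStep r bt
              (q ++ ((es ++ pvRtI r b).map (fun s => (s, bt + 1))), PySem.Set.add V b) rest := by
        show pvAStep r bt
            (if PySem.Set.contains V b then _ else _) rest = _
        rw [if_neg hb]
        simp [List.map_append, List.append_assoc]
      have h2 : pvExpB r (es, V) (b :: rest) = pvExpB r (es ++ pvRtI r b, PySem.Set.add V b) rest := by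
        show pvExpB r (if PySem.Set.contains V b then _ else _) rest = _
        rw [if_neg hb]
      rw [h1, h2]
      exact ih q (es ++ pvRtI r b) (PySem.Set.add V b)

theorem pvALoop_round (r : List (List Int)) (adj : PySem.Dict Int (List Int)) (dest : Int)
    (L : Int) :
    ∀ (zs es : List Int) (V : PySem.Set Int),
      pvALoop r adj dest (zs.map (fun s => (s, L)) ++ es.map (fun s => (s, L + 1))) V
        = if dest ∈ zs then L
          else pvALoop r adj dest
                ((pvExpS r adj (es, V) zs).1.map (fun s => (s, L + 1)))
                (pvExpS r adj (es, V) zs).2 := by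
  intro zs
  induction zs with
  | nil => intro es V; simp [pvExpS]
  | cons s zs' ih =>
    intro es V
    simp only [List.map_cons, List.cons_append]
    rw [pvALoop]
    by_cases hs : s = dest
    · have : dest ∈ s :: zs' := by rw [hs]; exact List.mem_cons_self
      simp [hs, this]
    · rw [if_neg hs]
      simp only []
      rw [pvAStep_shape r L (adj.getD s []) (zs'.map (fun s => (s, L))) es V]
      rw [ih (pvExpB r (es, V) (adj.getD s [])).1 (pvExpB r (es, V) (adj.getD s [])).2]
      have hmem : (dest ∈ s :: zs') ↔ (dest ∈ zs') := by
        rw [List.mem_cons]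
        constructor
        · rintro (h | h)
          · exact absurd h.symm hs
          · exact h
        · exact Or.inr
      have hexp : pvExpS r adj (es, V) (s :: zs')
          = pvExpS r adj (pvExpB r (es, V) (adj.getD s [])) zs' := rfl
      rw [hexp]
      by_cases hd : dest ∈ zs'
      · simp [hd, hmem.mpr hd]
      · simp only [if_neg hd, if_neg (fun h => hd (hmem.mp h))]

theorem pvAdjInner : ∀ (stations : List Int) (d : PySem.Dict Int (List Int)) (bv s b : Int),
    b ∈ (stations.foldl (fun d st => d.insert st (d.getD st [] ++ [bv])) d).getD s []
      ↔ b ∈ d.getD s [] ∨ (s ∈ stations ∧ b = bv) := by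
  intro stations
  induction stations with
  | nil => simp
  | cons st rest ih =>
    intro d bv s b
    rw [List.foldl_cons, ih]
    rw [PySem.Dict.getD_insert]
    by_cases hs : s = st
    · subst hs
      rw [if_pos rfl]
      simp only [List.mem_append, List.mem_singleton, List.mem_cons]
      tauto
    · simp only [if_neg hs, List.mem_cons]
      tauto

theorem pvAdjOuter : ∀ (l : List (List Int)) (k : Int) (d : PySem.Dict Int (List Int)) (s b : Int),
    b ∈ ((PySem.List.enumerate l k).foldl
        (fun d p => p.2.foldl (fun d st => d.insert st (d.getD st [] ++ [p.1])) d) d).getD s []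
      ↔ b ∈ d.getD s [] ∨ ∃ i : Nat, i < l.length ∧ b = k + i ∧ s ∈ l.getD i [] := by
  intro l
  induction l with
  | nil =>
    intro k d s b
    simp [PySem.List.enumerate]
  | cons x t ih =>
    intro k d s b
    rw [PySem.List.enumerate_cons, List.foldl_cons,
      ih (k + 1) (x.foldl (fun d st => d.insert st (d.getD st [] ++ [k])) d) s b,
      pvAdjInner]
    constructor
    · rintro ((h | ⟨hsx, rfl⟩) | ⟨i, hi, rfl, hsi⟩)
      · exact Or.inl h
      · exact Or.inr ⟨0, by simp, by simp, by simpa using hsx⟩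
      · refine Or.inr ⟨i + 1, by simpa using hi, by push_cast; ring, by simpa using hsi⟩
    · rintro (h | ⟨i, hi, rfl, hsi⟩)
      · exact Or.inl (Or.inl h)
      · cases i with
        | zero => exact Or.inl (Or.inr ⟨by simpa using hsi, by simp⟩)
        | succ n =>
          refine Or.inr ⟨n, by simpa using hi, by push_cast; ring, by simpa using hsi⟩

theorem pvAdj_mem (r : List (List Int)) (s b : Int) :
    b ∈ (pvAdj r).getD s [] ↔ ∃ j : Nat, j < r.length ∧ b = (j : Int) ∧ s ∈ pvRt r j := by
  unfold pvAdj
  rw [pvAdjOuter]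
  simp only [PySem.Dict.getD_empty, List.not_mem_nil, false_or, zero_add, pvRt]

theorem pvRtI_nat (r : List (List Int)) (j : Nat) (hj : j < r.length) :
    pvRtI r ((j : Int)) = pvRt r j := by
  unfold pvRtI pvRt
  rw [PySem.List.pyGet?_natCast, List.getD_eq_getElem?_getD]

theorem pvContains_add_iff (V : PySem.Set Int) (b y : Int) :
    PySem.Set.contains (PySem.Set.add V b) y = true ↔ PySem.Set.contains V y = true ∨ y = b := by
  simp [PySem.Set.contains_iff, PySem.Set.mem_add]

theorem pvContains_add_down (V : PySem.Set Int) (b y : Int)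
    (h : PySem.Set.contains (PySem.Set.add V b) y = false) :
    PySem.Set.contains V y = false := by
  rw [Bool.eq_false_iff] at h ⊢
  intro h1
  exact h ((pvContains_add_iff V b y).mpr (Or.inl h1))

theorem pvExpB_char (r : List (List Int)) :
    ∀ (buses : List Int) (es : List Int) (V : PySem.Set Int),
      (∀ x, x ∈ (pvExpB r (es, V) buses).1
          ↔ x ∈ es ∨ ∃ b ∈ buses, PySem.Set.contains V b = false ∧ x ∈ pvRtI r b)
      ∧ (∀ x, PySem.Set.contains (pvExpB r (es, V) buses).2 x = true
          ↔ PySem.Set.contains V x = true ∨ x ∈ buses) := by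
  intro buses
  induction buses with
  | nil =>
    intro es V
    constructor <;> intro x <;> simp [pvExpB]
  | cons b rest ih =>
    intro es V
    by_cases hb : PySem.Set.contains V b = true
    · have hskip : pvExpB r (es, V) (b :: rest) = pvExpB r (es, V) rest := by
        show pvExpB r (if PySem.Set.contains V b then _ else _) rest = _
        rw [if_pos hb]
      rw [hskip]
      obtain ⟨ih1, ih2⟩ := ih es V
      refine ⟨fun x => ?_, fun x => ?_⟩
      · rw [ih1 x]
        constructor
        · rintro (h | ⟨b', hb', hc, hx⟩)
          · exact Or.inl h
          · exact Or.inr ⟨b', List.mem_cons_of_mem _ hb', hc, hx⟩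
        · rintro (h | ⟨b', hb', hc, hx⟩)
          · exact Or.inl h
          · rcases List.mem_cons.mp hb' with rfl | hb''
            · rw [hb] at hc; cases hc
            · exact Or.inr ⟨b', hb'', hc, hx⟩
      · rw [ih2 x]
        constructor
        · rintro (h | h)
          · exact Or.inl h
          · exact Or.inr (List.mem_cons_of_mem _ h)
        · rintro (h | h)
          · exact Or.inl h
          · rcases List.mem_cons.mp h with rfl | h'
            · exact Or.inl hb
            · exact Or.inr h'
    · have hbf : PySem.Set.contains V b = false := by simpa using hb
      have hstep : pvExpB r (es, V) (b :: rest)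
          = pvExpB r (es ++ pvRtI r b, PySem.Set.add V b) rest := by
        show pvExpB r (if PySem.Set.contains V b then _ else _) rest = _
        rw [if_neg hb]
      rw [hstep]
      obtain ⟨ih1, ih2⟩ := ih (es ++ pvRtI r b) (PySem.Set.add V b)
      refine ⟨fun x => ?_, fun x => ?_⟩
      · rw [ih1 x]
        simp only [List.mem_append]
        constructor
        · rintro ((h | h) | ⟨b', hb', hc, hx⟩)
          · exact Or.inl h
          · exact Or.inr ⟨b, List.mem_cons_self, hbf, h⟩
          · exact Or.inr ⟨b', List.mem_cons_of_mem _ hb', pvContains_add_down V b b' hc, hx⟩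
        · rintro (h | ⟨b', hb', hc, hx⟩)
          · exact Or.inl (Or.inl h)
          · rcases List.mem_cons.mp hb' with rfl | hb''
            · exact Or.inl (Or.inr hx)
            · by_cases hcb : b' = b
              · exact Or.inl (Or.inr (hcb ▸ hx))
              · refine Or.inr ⟨b', hb'', ?_, hx⟩
                rw [Bool.eq_false_iff]
                intro hcc
                rcases (pvContains_add_iff V b b').mp hcc with h1 | h1
                · rw [h1] at hc; cases hc
                · exact hcb h1
      · rw [ih2 x, pvContains_add_iff]
        constructor
        · rintro ((h | rfl) | h)
          · exact Or.inl h
          · exact Or.inr List.mem_cons_self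
          · exact Or.inr (List.mem_cons_of_mem _ h)
        · rintro (h | h)
          · exact Or.inl (Or.inl h)
          · rcases List.mem_cons.mp h with rfl | h'
            · exact Or.inl (Or.inr rfl)
            · exact Or.inr h'

theorem pvExpS_char (r : List (List Int)) :
    ∀ (zs es : List Int) (V : PySem.Set Int),
      (∀ x, x ∈ (pvExpS r (pvAdj r) (es, V) zs).1
          ↔ x ∈ es ∨ ∃ j : Nat, j < r.length ∧ PySem.Set.contains V ((j : Int)) = false ∧
              pvMeetsB r j zs = true ∧ x ∈ pvRt r j)
      ∧ (∀ x, PySem.Set.contains (pvExpS r (pvAdj r) (es, V) zs).2 x = true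
          ↔ PySem.Set.contains V x = true ∨
              ∃ j : Nat, j < r.length ∧ x = (j : Int) ∧ pvMeetsB r j zs = true) := by
  intro zs
  induction zs with
  | nil =>
    intro es V
    constructor <;> intro x <;> simp [pvExpS, pvMeetsB_nil]
  | cons s zs' ih =>
    intro es V
    have hstep : pvExpS r (pvAdj r) (es, V) (s :: zs')
        = pvExpS r (pvAdj r)
            ((pvExpB r (es, V) ((pvAdj r).getD s [])).1,
             (pvExpB r (es, V) ((pvAdj r).getD s [])).2) zs' := by
      rw [Prod.mk.eta]; rfl
    obtain ⟨e1, v1⟩ := pvExpB_char r ((pvAdj r).getD s []) es V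
    obtain ⟨ihe, ihv⟩ := ih (pvExpB r (es, V) ((pvAdj r).getD s [])).1
      (pvExpB r (es, V) ((pvAdj r).getD s [])).2
    have he1 : ∀ x, x ∈ (pvExpB r (es, V) ((pvAdj r).getD s [])).1
        ↔ x ∈ es ∨ ∃ j : Nat, j < r.length ∧ PySem.Set.contains V ((j : Int)) = false ∧
            s ∈ pvRt r j ∧ x ∈ pvRt r j := by
      intro x
      rw [e1 x]
      constructor
      · rintro (h | ⟨b, hb, hc, hx⟩)
        · exact Or.inl h
        · obtain ⟨j, hj, rfl, hsj⟩ := (pvAdj_mem r s b).mp hb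
          rw [pvRtI_nat r j hj] at hx
          exact Or.inr ⟨j, hj, hc, hsj, hx⟩
      · rintro (h | ⟨j, hj, hc, hsj, hx⟩)
        · exact Or.inl h
        · exact Or.inr ⟨(j : Int), (pvAdj_mem r s ((j : Int))).mpr ⟨j, hj, rfl, hsj⟩, hc,
            by rw [pvRtI_nat r j hj]; exact hx⟩
    have hv1 : ∀ x, PySem.Set.contains (pvExpB r (es, V) ((pvAdj r).getD s [])).2 x = true
        ↔ PySem.Set.contains V x = true ∨
            ∃ j : Nat, j < r.length ∧ x = (j : Int) ∧ s ∈ pvRt r j := by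
      intro x
      rw [v1 x]
      constructor
      · rintro (h | h)
        · exact Or.inl h
        · obtain ⟨j, hj, rfl, hsj⟩ := (pvAdj_mem r s x).mp h
          exact Or.inr ⟨j, hj, rfl, hsj⟩
      · rintro (h | ⟨j, hj, rfl, hsj⟩)
        · exact Or.inl h
        · exact Or.inr ((pvAdj_mem r s ((j : Int))).mpr ⟨j, hj, rfl, hsj⟩)
    have hv1down : ∀ (j : Nat), PySem.Set.contains
        (pvExpB r (es, V) ((pvAdj r).getD s [])).2 ((j : Int)) = false →
        PySem.Set.contains V ((j : Int)) = false := by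
      intro j h
      rw [Bool.eq_false_iff] at h ⊢
      intro h1
      exact h ((hv1 _).mpr (Or.inl h1))
    rw [hstep]
    refine ⟨fun x => ?_, fun x => ?_⟩
    · rw [ihe x]
      constructor
      · rintro (h1 | ⟨j, hj, hc, hm, hx⟩)
        · rcases (he1 x).mp h1 with h | ⟨j, hj, hc, hsj, hx⟩
          · exact Or.inl h
          · exact Or.inr ⟨j, hj, hc, (pvMeetsB_cons_iff r j s zs').mpr (Or.inl hsj), hx⟩
        · exact Or.inr ⟨j, hj, hv1down j hc,
            (pvMeetsB_cons_iff r j s zs').mpr (Or.inr hm), hx⟩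
      · rintro (h | ⟨j, hj, hc, hm, hx⟩)
        · exact Or.inl ((he1 x).mpr (Or.inl h))
        · by_cases hsj : s ∈ pvRt r j
          · exact Or.inl ((he1 x).mpr (Or.inr ⟨j, hj, hc, hsj, hx⟩))
          · rcases (pvMeetsB_cons_iff r j s zs').mp hm with h2 | hm'
            · exact absurd h2 hsj
            · refine Or.inr ⟨j, hj, ?_, hm', hx⟩
              rw [Bool.eq_false_iff]
              intro h1
              rcases (hv1 _).mp h1 with h2 | ⟨j', hj', hjj, hsj'⟩
              · rw [h2] at hc; cases hc
              · have : j' = j := by exact_mod_cast hjj.symm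
                subst this
                exact hsj hsj'
    · rw [ihv x]
      constructor
      · rintro (h1 | ⟨j, hj, rfl, hm⟩)
        · rcases (hv1 x).mp h1 with h | ⟨j, hj, rfl, hsj⟩
          · exact Or.inl h
          · exact Or.inr ⟨j, hj, rfl, (pvMeetsB_cons_iff r j s zs').mpr (Or.inl hsj)⟩
        · exact Or.inr ⟨j, hj, rfl, (pvMeetsB_cons_iff r j s zs').mpr (Or.inr hm)⟩
      · rintro (h | ⟨j, hj, rfl, hm⟩)
        · exact Or.inl ((hv1 x).mpr (Or.inl h))
        · rcases (pvMeetsB_cons_iff r j s zs').mp hm with hsj | hm'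
          · exact Or.inl ((hv1 _).mpr (Or.inr ⟨j, hj, rfl, hsj⟩))
          · exact Or.inr ⟨j, hj, rfl, hm'⟩

theorem pvMet_full (r : List (List Int)) (prev : List Int)
    (h : r.length ≤ pvMet r prev) : ∀ j, j < r.length → pvMeetsB r j prev = true := by
  intro j hj
  by_contra hjf
  have hjf' : pvMeetsB r j prev = false := by simpa using hjf
  have hlt := pvFilterLt (List.range r.length) (fun i => pvMeetsB r i prev) (fun _ => true)
    (fun _ _ _ => rfl) j (List.mem_range.mpr hj) hjf' rfl
  rw [List.filter_true, List.length_range] at hlt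
  unfold pvMet at h
  omega

theorem pvA2G (r : List (List Int)) (dest : Int) :
    ∀ (k : Nat) (prev zs : List Int) (V : PySem.Set Int) (L : Int),
      (∀ x, PySem.Set.contains V x = true
          ↔ ∃ j : Nat, j < r.length ∧ x = (j : Int) ∧ pvMeetsB r j prev = true) →
      r.length ≤ pvMet r prev + k →
      pvALoop r (pvAdj r) dest (zs.map (fun s => (s, L))) V
        = if dest ∈ zs then L else pvG r dest k (L + 1) prev zs := by
  intro k
  induction k with
  | zero =>
    intro prev zs V L Hv hk
    have hround := pvALoop_round r (pvAdj r) dest L zs [] V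
    simp only [List.map_nil, List.append_nil] at hround
    rw [hround]
    obtain ⟨hE, _⟩ := pvExpS_char r zs [] V
    have hfull := pvMet_full r prev (by omega)
    have hEnil : (pvExpS r (pvAdj r) ([], V) zs).1 = [] := by
      rw [List.eq_nil_iff_forall_not_mem]
      intro x hx
      rcases (hE x).mp hx with h | ⟨j, hj, hc, _, _⟩
      · exact absurd h (List.not_mem_nil)
      · have : PySem.Set.contains V ((j : Int)) = true :=
          (Hv _).mpr ⟨j, hj, rfl, hfull j hj⟩
        rw [this] at hc; cases hc
    by_cases hd : dest ∈ zs
    · simp [hd]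
    · rw [if_neg hd, if_neg hd, hEnil]
      simp only [List.map_nil]
      rw [pvALoop]
      rfl
  | succ k ih =>
    intro prev zs V L Hv hk
    have HVj : ∀ j : Nat, j < r.length →
        (PySem.Set.contains V ((j : Int)) = true ↔ pvMeetsB r j prev = true) := by
      intro j hj
      rw [Hv]
      constructor
      · rintro ⟨j', hj', hcast, hm⟩
        have : j' = j := by exact_mod_cast hcast.symm
        subst this; exact hm
      · intro hm; exact ⟨j, hj, rfl, hm⟩
    have HVjf : ∀ j : Nat, j < r.length →
        (PySem.Set.contains V ((j : Int)) = false ↔ pvMeetsB r j prev = false) := by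
      intro j hj
      rw [Bool.eq_false_iff, Bool.eq_false_iff]
      exact not_congr (HVj j hj)
    have hround := pvALoop_round r (pvAdj r) dest L zs [] V
    simp only [List.map_nil, List.append_nil] at hround
    rw [hround]
    obtain ⟨hE, hW⟩ := pvExpS_char r zs [] V
    set E := (pvExpS r (pvAdj r) ([], V) zs).1 with hEdef
    set W := (pvExpS r (pvAdj r) ([], V) zs).2 with hWdef
    set f := (pvNew r prev zs).flatMap (pvRt r) with hfdef
    have hmemEf : ∀ x, x ∈ E ↔ x ∈ f := by
      intro x
      rw [hE x, hfdef]
      simp only [List.mem_flatMap, List.not_mem_nil, false_or, pvNew, List.mem_filter,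
        List.mem_range, Bool.and_eq_true, Bool.not_eq_true']
      constructor
      · rintro ⟨j, hj, hc, hm, hx⟩
        exact ⟨j, ⟨hj, (HVjf j hj).mp hc, hm⟩, hx⟩
      · rintro ⟨j, ⟨hj, hc, hm⟩, hx⟩
        exact ⟨j, hj, (HVjf j hj).mpr hc, hm, hx⟩
    have hGunfold : pvG r dest (k + 1) (L + 1) prev zs
        = if dest ∈ f then L + 1 else pvG r dest k (L + 1 + 1) (prev ++ zs) f := rfl
    by_cases hd : dest ∈ zs
    · simp [hd]
    · rw [if_neg hd, if_neg hd, hGunfold]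
      by_cases hEnil : E = []
      · have hfnil : f = [] := by
          rw [List.eq_nil_iff_forall_not_mem]
          intro x hx
          rw [List.eq_nil_iff_forall_not_mem] at hEnil
          exact hEnil x ((hmemEf x).mpr hx)
        rw [hEnil, hfnil]
        simp only [List.map_nil, List.not_mem_nil, if_false]
        rw [pvALoop, pvG_empty]
      · obtain ⟨x0, hx0⟩ := List.exists_mem_of_ne_nil E hEnil
        obtain ⟨j0, hj0, hc0, hm0, _⟩ := ((hE x0).mp hx0).resolve_left (List.not_mem_nil)
        have hfuel : r.length ≤ pvMet r (prev ++ zs) + k := by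
          have := pvMet_succ_le r prev zs j0 hj0 ((HVjf j0 hj0).mp hc0) hm0
          omega
        have Hv' : ∀ x, PySem.Set.contains W x = true
            ↔ ∃ j : Nat, j < r.length ∧ x = (j : Int) ∧ pvMeetsB r j (prev ++ zs) = true := by
          intro x
          rw [hW x]
          constructor
          · rintro (h | ⟨j, hj, rfl, hm⟩)
            · obtain ⟨j, hj, rfl, hm⟩ := (Hv x).mp h
              exact ⟨j, hj, rfl, by rw [pvMeetsB_append, hm, Bool.true_or]⟩
            · exact ⟨j, hj, rfl, by rw [pvMeetsB_append, hm, Bool.or_true]⟩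
          · rintro ⟨j, hj, rfl, hm⟩
            rw [pvMeetsB_append, Bool.or_eq_true] at hm
            rcases hm with hm | hm
            · exact Or.inl ((Hv _).mpr ⟨j, hj, rfl, hm⟩)
            · exact Or.inr ⟨j, hj, rfl, hm⟩
        rw [ih (prev ++ zs) E W (L + 1) Hv' hfuel]
        have hdEf : (dest ∈ E) ↔ (dest ∈ f) := hmemEf dest
        by_cases hdf : dest ∈ f
        · rw [if_pos (hdEf.mpr hdf), if_pos hdf]
        · rw [if_neg (fun h => hdf (hdEf.mp h)), if_neg hdf]
          exact pvG_congr r dest k (L + 1 + 1) (prev ++ zs) E (prev ++ zs) f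
            (fun s => Iff.rfl) hmemEf

theorem pvGetDSet (u : List Bool) (k j : Nat) (hk : k < u.length) :
    (u.set k true).getD j false = if j = k then true else u.getD j false := by
  rw [List.getD_eq_getElem?_getD, List.getD_eq_getElem?_getD, List.getElem?_set]
  by_cases h : j = k
  · subst h; simp [hk]
  · have h2 : ¬ k = j := fun hh => h hh.symm
    simp [h, h2]

theorem pvBRound_char (r : List (List Int)) (reached : PySem.Set Int) :
    ∀ (l : List (List Int)) (k : Nat) (u : List Bool) (f0 : PySem.Set Int),
      k + l.length ≤ u.length →
      ((pvBRound r reached (u, f0) (PySem.List.enumerate l ((k : Int)))).1.length = u.length)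
      ∧ (∀ j, j < u.length →
          ((pvBRound r reached (u, f0) (PySem.List.enumerate l ((k : Int)))).1.getD j false = true
            ↔ u.getD j false = true ∨
              (k ≤ j ∧ j < k + l.length ∧
                (l.getD (j - k) []).any (fun s => PySem.Set.contains reached s) = true)))
      ∧ (∀ x, PySem.Set.contains
            (pvBRound r reached (u, f0) (PySem.List.enumerate l ((k : Int)))).2 x = true
          ↔ PySem.Set.contains f0 x = true ∨
            ∃ i, i < l.length ∧ u.getD (k + i) false = false ∧
              (l.getD i []).any (fun s => PySem.Set.contains reached s) = true ∧
              x ∈ l.getD i []) := by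
  intro l
  induction l with
  | nil =>
    intro k u f0 _
    refine ⟨rfl, fun j _ => ?_, fun x => ?_⟩
    · show u.getD j false = true ↔ _
      simp
    · show PySem.Set.contains f0 x = true ↔ _
      simp
  | cons st l' ih =>
    intro k u f0 hlen
    have hk : k < u.length := by simp at hlen; omega
    have henum : PySem.List.enumerate (st :: l') ((k : Int))
        = ((k : Int), st) :: PySem.List.enumerate l' (((k + 1 : Nat) : Int)) := by
      rw [PySem.List.enumerate_cons]; push_cast; ring_nf
    have hget : PySem.List.pyGetD u ((k : Int)) false = u.getD k false :=
      PySem.List.pyGetD_natCast u k false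
    by_cases hcond : (!(u.getD k false) && st.any (fun s => PySem.Set.contains reached s)) = true
    · -- condition fires: used[k] := True, frontier |= st
      have hstep : pvBRound r reached (u, f0) (PySem.List.enumerate (st :: l') ((k : Int)))
          = pvBRound r reached (u.set k true, PySem.Set.update f0 st)
              (PySem.List.enumerate l' (((k + 1 : Nat) : Int))) := by
        rw [henum]
        show pvBRound r reached
          (if !(PySem.List.pyGetD u ((k : Int)) false) && st.any (fun s => PySem.Set.contains reached s)
           then (u.set ((k : Int)).toNat true, PySem.Set.update f0 st)
           else (u, f0)) _ = _
        rw [hget, if_pos hcond]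
        simp
      rw [Bool.and_eq_true, Bool.not_eq_true'] at hcond
      obtain ⟨hu0, hany⟩ := hcond
      obtain ⟨iha, ihb, ihc⟩ := ih (k + 1) (u.set k true) (PySem.Set.update f0 st)
        (by simp at hlen ⊢; omega)
      rw [hstep]
      refine ⟨by rw [iha]; exact List.length_set, fun j hj => ?_, fun x => ?_⟩
      · rw [ihb j (by rw [List.length_set]; exact hj), pvGetDSet u k j hk]
        by_cases hjk : j = k
        · subst hjk
          rw [if_pos rfl]
          constructor
          · intro _
            exact Or.inr ⟨Nat.le_refl _, by simp only [List.length_cons]; omega, by simpa using hany⟩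
          · intro _; exact Or.inl rfl
        · rw [if_neg hjk]
          constructor
          · rintro (h | ⟨h1, h2, h3⟩)
            · exact Or.inl h
            · refine Or.inr ⟨by omega, by simp only [List.length_cons]; omega, ?_⟩
              have : j - k = (j - (k + 1)) + 1 := by omega
              rw [this, List.getD_cons_succ]
              exact h3
          · rintro (h | ⟨h1, h2, h3⟩)
            · exact Or.inl h
            · have hj1 : k + 1 ≤ j := by omega
              refine Or.inr ⟨hj1, by simp only [List.length_cons] at h2 ⊢; omega, ?_⟩
              have : j - k = (j - (k + 1)) + 1 := by omega
              rw [this, List.getD_cons_succ] at h3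
              exact h3
      · rw [ihc x]
        have hupd : PySem.Set.contains (PySem.Set.update f0 st) x = true
            ↔ PySem.Set.contains f0 x = true ∨ x ∈ st := by
          simp [PySem.Set.contains_iff, PySem.Set.mem_update]
        rw [hupd]
        constructor
        · rintro ((h | h) | ⟨i, hi, hui, hai, hxi⟩)
          · exact Or.inl h
          · exact Or.inr ⟨0, by simp, by simpa using hu0, by simpa using hany, by simpa using h⟩
          · rw [pvGetDSet u k ((k + 1) + i) hk, if_neg (by omega)] at hui
            exact Or.inr ⟨i + 1, by simpa using hi, by
              have : k + (i + 1) = (k + 1) + i := by omega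
              rw [this]; exact hui, by simpa using hai, by simpa using hxi⟩
        · rintro (h | ⟨i, hi, hui, hai, hxi⟩)
          · exact Or.inl (Or.inl h)
          · cases i with
            | zero => exact Or.inl (Or.inr (by simpa using hxi))
            | succ m =>
              refine Or.inr ⟨m, by simpa using hi, ?_, by simpa using hai, by simpa using hxi⟩
              rw [pvGetDSet u k ((k + 1) + m) hk, if_neg (by omega)]
              have : k + (m + 1) = (k + 1) + m := by omega
              rw [this] at hui
              exact hui
    · -- condition does not fire
      have hstep : pvBRound r reached (u, f0) (PySem.List.enumerate (st :: l') ((k : Int)))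
          = pvBRound r reached (u, f0) (PySem.List.enumerate l' (((k + 1 : Nat) : Int))) := by
        rw [henum]
        show pvBRound r reached
          (if !(PySem.List.pyGetD u ((k : Int)) false) && st.any (fun s => PySem.Set.contains reached s)
           then (u.set ((k : Int)).toNat true, PySem.Set.update f0 st)
           else (u, f0)) _ = _
        rw [hget, if_neg hcond]
      have hcond' : u.getD k false = true ∨ st.any (fun s => PySem.Set.contains reached s) = false := by
        by_cases hu : u.getD k false = true
        · exact Or.inl hu
        · have hu' : u.getD k false = false := by simpa using hu
          by_cases ha : st.any (fun s => PySem.Set.contains reached s) = true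
          · exact absurd (by rw [hu', ha]; rfl) hcond
          · exact Or.inr (by simpa using ha)
      obtain ⟨iha, ihb, ihc⟩ := ih (k + 1) u f0 (by simp at hlen ⊢; omega)
      rw [hstep]
      refine ⟨iha, fun j hj => ?_, fun x => ?_⟩
      · rw [ihb j hj]
        by_cases hjk : j = k
        · subst hjk
          constructor
          · rintro (h | ⟨h1, _, _⟩)
            · exact Or.inl h
            · omega
          · rintro (h | ⟨h1, h2, h3⟩)
            · exact Or.inl h
            · rcases hcond' with h4 | h4
              · exact Or.inl h4
              · have : j - j = 0 := by omega
                rw [this, List.getD_cons_zero] at h3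
                rw [h3] at h4; cases h4
        · constructor
          · rintro (h | ⟨h1, h2, h3⟩)
            · exact Or.inl h
            · refine Or.inr ⟨by omega, by simp only [List.length_cons]; omega, ?_⟩
              have : j - k = (j - (k + 1)) + 1 := by omega
              rw [this, List.getD_cons_succ]
              exact h3
          · rintro (h | ⟨h1, h2, h3⟩)
            · exact Or.inl h
            · refine Or.inr ⟨by omega, by simp only [List.length_cons] at h2 ⊢; omega, ?_⟩
              have : j - k = (j - (k + 1)) + 1 := by omega
              rw [this, List.getD_cons_succ] at h3
              exact h3
      · rw [ihc x]
        constructor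
        · rintro (h | ⟨i, hi, hui, hai, hxi⟩)
          · exact Or.inl h
          · exact Or.inr ⟨i + 1, by simpa using hi, by
              have : k + (i + 1) = (k + 1) + i := by omega
              rw [this]; exact hui, by simpa using hai, by simpa using hxi⟩
        · rintro (h | ⟨i, hi, hui, hai, hxi⟩)
          · exact Or.inl h
          · cases i with
            | zero =>
              rcases hcond' with h4 | h4
              · rw [Nat.add_zero] at hui; rw [hui] at h4; cases h4
              · rw [List.getD_cons_zero] at hai
                rw [hai] at h4; cases h4
            | succ m =>
              refine Or.inr ⟨m, by simpa using hi, ?_, by simpa using hai, by simpa using hxi⟩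
              have : k + (m + 1) = (k + 1) + m := by omega
              rw [this] at hui
              exact hui

theorem pvB2G (r : List (List Int)) (dest : Int) :
    ∀ (k : Nat) (L : Int) (prev zs : List Int) (reached : PySem.Set Int) (used : List Bool),
      used.length = r.length →
      (∀ j, j < r.length → (used.getD j false = true ↔ pvMeetsB r j prev = true)) →
      (∀ x, PySem.Set.contains reached x = true ↔ (x ∈ prev ∨ x ∈ zs)) →
      pvBLoop r dest ((List.range k).map (fun (i : Nat) => L + (i : Int))) reached used
        = pvG r dest k L prev zs := by
  intro k
  induction k with
  | zero => intros; rfl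
  | succ k ih =>
    intro L prev zs reached used hlen hu hr
    have hlevels : (List.range (k + 1)).map (fun (i : Nat) => L + (i : Int))
        = L :: (List.range k).map (fun (i : Nat) => (L + 1) + (i : Int)) := by
      rw [List.range_succ_eq_map, List.map_cons, List.map_map]
      norm_num
      intro a _
      ring
    rw [hlevels]
    obtain ⟨ha, hb, hc⟩ := pvBRound_char r reached r 0 used PySem.Set.empty
      (by omega)
    simp only [Nat.cast_zero, Nat.zero_add, Nat.sub_zero, Nat.le_zero_eq, Nat.zero_le,
      true_and] at ha hb hc
    have hemp : ∀ y : Int, PySem.Set.contains PySem.Set.empty y = false := by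
      intro y
      rw [Bool.eq_false_iff, Ne, PySem.Set.contains_iff]
      exact List.not_mem_nil
    have hany_iff : ∀ i, ((r.getD i []).any (fun s => PySem.Set.contains reached s) = true)
        ↔ (pvMeetsB r i prev = true ∨ pvMeetsB r i zs = true) := by
      intro i
      rw [List.any_eq_true, pvMeetsB_iff, pvMeetsB_iff]
      constructor
      · rintro ⟨s, hs, hcs⟩
        rcases (hr s).mp hcs with h | h
        · exact Or.inl ⟨s, hs, h⟩
        · exact Or.inr ⟨s, hs, h⟩
      · rintro (⟨s, hs, h⟩ | ⟨s, hs, h⟩)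
        · exact ⟨s, hs, (hr s).mpr (Or.inl h)⟩
        · exact ⟨s, hs, (hr s).mpr (Or.inr h)⟩
    have hfr : ∀ x, (x ∈ (pvNew r prev zs).flatMap (pvRt r))
        ↔ ∃ i, i < r.length ∧ used.getD i false = false ∧
            (r.getD i []).any (fun s => PySem.Set.contains reached s) = true ∧
            x ∈ r.getD i [] := by
      intro x
      simp only [List.mem_flatMap, pvNew, List.mem_filter, List.mem_range,
        Bool.and_eq_true, Bool.not_eq_true']
      constructor
      · rintro ⟨i, ⟨hi, hmp, hmz⟩, hx⟩
        refine ⟨i, hi, ?_, (hany_iff i).mpr (Or.inr hmz), hx⟩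
        by_cases h : used.getD i false = true
        · rw [(hu i hi).mp h] at hmp; cases hmp
        · simpa using h
      · rintro ⟨i, hi, hui, hai, hx⟩
        have hmp : pvMeetsB r i prev = false := by
          by_cases h : pvMeetsB r i prev = true
          · rw [(hu i hi).mpr h] at hui; cases hui
          · simpa using h
        rcases (hany_iff i).mp hai with h | h
        · rw [h] at hmp; cases hmp
        · exact ⟨i, ⟨hi, hmp, h⟩, hx⟩
    have hGunfold : pvG r dest (k + 1) L prev zs
        = if dest ∈ (pvNew r prev zs).flatMap (pvRt r) then L
          else pvG r dest k (L + 1) (prev ++ zs) ((pvNew r prev zs).flatMap (pvRt r)) := rfl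
    have hBunfold : pvBLoop r dest
          (L :: (List.range k).map (fun (i : Nat) => (L + 1) + (i : Int))) reached used
        = (if PySem.Set.contains
              (pvBRound r reached (used, PySem.Set.empty) (PySem.List.enumerate r 0)).2 dest
           then L
           else if (pvBRound r reached (used, PySem.Set.empty) (PySem.List.enumerate r 0)).2 = []
           then -1
           else pvBLoop r dest ((List.range k).map (fun (i : Nat) => (L + 1) + (i : Int)))
              (PySem.Set.union reached
                (pvBRound r reached (used, PySem.Set.empty) (PySem.List.enumerate r 0)).2)
              (pvBRound r reached (used, PySem.Set.empty) (PySem.List.enumerate r 0)).1) := rfl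
    rw [hBunfold, hGunfold]
    have hdest_iff : PySem.Set.contains
          (pvBRound r reached (used, PySem.Set.empty) (PySem.List.enumerate r 0)).2 dest = true
        ↔ dest ∈ (pvNew r prev zs).flatMap (pvRt r) := by
      rw [hc dest, hfr dest, hemp dest]
      simp only [Bool.false_eq_true, false_or]
    by_cases hdd : dest ∈ (pvNew r prev zs).flatMap (pvRt r)
    · rw [if_pos (hdest_iff.mpr hdd), if_pos hdd]
    · rw [if_neg (fun h => hdd (hdest_iff.mp h)), if_neg hdd]
      by_cases hfe : (pvBRound r reached (used, PySem.Set.empty) (PySem.List.enumerate r 0)).2 = []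
      · -- empty frontier: B exits with -1; the ghost's frontier list is empty too, so G returns -1
        have hfnil : (pvNew r prev zs).flatMap (pvRt r) = [] := by
          rw [List.eq_nil_iff_forall_not_mem]
          intro x hx
          have h1 : PySem.Set.contains
              (pvBRound r reached (used, PySem.Set.empty) (PySem.List.enumerate r 0)).2 x = true := by
            rw [hc x, hemp x]
            simp only [Bool.false_eq_true, false_or]
            exact (hfr x).mp hx
          rw [hfe] at h1
          rw [PySem.Set.contains_iff] at h1
          exact absurd h1 List.not_mem_nil
        rw [if_pos hfe, hfnil, pvG_empty]
      · rw [if_neg hfe]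
        apply ih (L + 1) (prev ++ zs) ((pvNew r prev zs).flatMap (pvRt r))
        · rw [ha, hlen]
        · intro j hj
          rw [hb j (by omega), pvMeetsB_append, Bool.or_eq_true]
          constructor
          · rintro (h | ⟨hjn, hja⟩)
            · exact Or.inl ((hu j hj).mp h)
            · rcases (hany_iff j).mp hja with h | h
              · exact Or.inl h
              · exact Or.inr h
          · rintro (h | h)
            · exact Or.inl ((hu j hj).mpr h)
            · exact Or.inr ⟨hj, (hany_iff j).mpr (Or.inr h)⟩
        · intro x
          have hun : PySem.Set.contains
                (PySem.Set.union reached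
                  (pvBRound r reached (used, PySem.Set.empty) (PySem.List.enumerate r 0)).2) x = true
              ↔ PySem.Set.contains reached x = true ∨ PySem.Set.contains
                  (pvBRound r reached (used, PySem.Set.empty) (PySem.List.enumerate r 0)).2 x = true := by
            simp [PySem.Set.contains_iff, PySem.Set.mem_union]
          rw [hun, hr x, hc x, hemp x]
          simp only [Bool.false_eq_true, false_or, List.mem_append]
          rw [← hfr x]

theorem pvPyRange : ∀ n : Nat,
    PySem.List.pyRange 1 ((n : Int) + 1) = (List.range n).map (fun (i : Nat) => 1 + (i : Int)) := by
  intro n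
  induction n with
  | zero => rfl
  | succ m ih =>
    have h1 : ((m + 1 : Nat) : Int) + 1 = ((m : Int) + 1) + 1 := by push_cast; ring
    rw [h1, PySem.List.pyRange_one_succ_right (by omega), ih, List.range_succ]
    simp only [List.map_append, List.map_cons, List.map_nil]
    congr 2
    ring

-- ===== VERDICT (by name: the statement is the Claim_ definition above) =====
theorem minimum_buses_spec : Claim_equal_minimum_buses := by
  unfold Claim_equal_minimum_buses
  intro r src dest _
  unfold Spec_minimum_buses minimum_buses minimum_buses_alt
  by_cases hsd : src = dest
  · rw [if_pos hsd, pvALoop, if_pos hsd]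
  · rw [if_neg hsd]
    have hA := pvA2G r dest r.length [] [src] PySem.Set.empty 0
      (fun x => by
        constructor
        · intro h
          rw [PySem.Set.contains_iff] at h
          exact absurd h List.not_mem_nil
        · rintro ⟨j, _, _, hm⟩
          rw [pvMeetsB_nil] at hm
          cases hm)
      (by rw [pvMet_nil]; omega)
    simp only [List.map_cons, List.map_nil] at hA
    rw [hA, if_neg (fun h => hsd (List.mem_singleton.mp h).symm)]
    rw [pvPyRange r.length]
    have hB := pvB2G r dest r.length 1 [] [src] (PySem.Set.ofList [src])
      (List.replicate r.length false)
      (List.length_replicate)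
      (fun j hj => by
        rw [pvMeetsB_nil, List.getD_replicate _ hj])
      (fun x => by
        rw [PySem.Set.contains_iff, PySem.Set.mem_ofList]
        simp)
    rw [hB]
    norm_num
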